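-- pv_equiv track=rewrite | github.com/TheAnswer96/JCSS23-Wireless-IoT-Sensors-Data-Collection-Reward-Using-Costrained-Drones | ILP.py | get_i_in_j
-- ===== SOURCE A (Python) =====
-- def get_i_in_j(wps, N):
--     list_i_in_j = []
--     for i in range(N):
--         i_in_j = set()
--         for j in range(len(wps)):
--             if i in wps[j]:
--                 i_in_j.add(j)
--         list_i_in_j.append(i_in_j)
--     return list_i_in_j
-- ===== SOURCE B (Python) =====
-- def get_i_in_j(wps, N):
--     buckets = [set() for _ in range(N)]
--     for j, lst in enumerate(wps):
--         for v in lst: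
--             if 0 <= v < N:
--                 buckets[v].add(j)
--     return buckets
-- ===== Notes on version B (the rewrite author's own statement) =====
-- stated objective: faster
-- what changed: Instead of scanning every list for every i in range(N) (membership test per (i,j) pair), B makes one pass over the elements of wps and buckets each index j under every in-range value v it contains.
import Mathlib
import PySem

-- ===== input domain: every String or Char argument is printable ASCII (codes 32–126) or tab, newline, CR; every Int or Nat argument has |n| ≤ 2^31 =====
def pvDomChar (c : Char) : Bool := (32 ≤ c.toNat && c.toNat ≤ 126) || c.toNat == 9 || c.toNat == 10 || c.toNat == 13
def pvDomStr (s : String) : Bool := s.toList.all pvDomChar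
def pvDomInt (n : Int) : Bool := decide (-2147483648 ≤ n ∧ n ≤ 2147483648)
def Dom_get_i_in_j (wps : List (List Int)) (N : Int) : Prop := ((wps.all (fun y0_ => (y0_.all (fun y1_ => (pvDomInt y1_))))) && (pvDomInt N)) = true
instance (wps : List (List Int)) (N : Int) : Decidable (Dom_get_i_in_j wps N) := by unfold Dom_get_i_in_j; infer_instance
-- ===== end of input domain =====

-- B replaces A's per-i scan of every list by one bucketing pass over the elements of wps (objective: faster, asymptotic).

-- ===== PORT A =====
-- inner loop of A: for j in range(len(wps)): if i in wps[j]: i_in_j.add(j)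
-- (wps[j] ported as pyGetD with default []: exact, since j ranges over 0..len(wps)-1)
def aInner (wps : List (List Int)) (i : Int) : List Int :=
  (PySem.List.pyRange 0 (wps.length : Int) 1).foldl
    (fun s j => if (PySem.List.pyGetD wps j []).contains i then PySem.Set.add s j else s)
    PySem.Set.empty

def get_i_in_j (wps : List (List Int)) (N : Int) : List (List Int) :=
  (PySem.List.pyRange 0 N 1).foldl (fun acc i => acc ++ [aInner wps i]) []

-- ===== PORT B =====
-- one element-step of B: if 0 <= v < N: buckets[v].add(j)
def bRow (N : Int) (j : Int) (bks : List (List Int)) (v : Int) : List (List Int) :=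
  if 0 ≤ v ∧ v < N then bks.set v.toNat (PySem.Set.add (bks.getD v.toNat PySem.Set.empty) j) else bks

def get_i_in_j_alt (wps : List (List Int)) (N : Int) : List (List Int) :=
  (PySem.List.enumerate wps 0).foldl (fun bks p => p.2.foldl (bRow N p.1) bks)
    (List.replicate N.toNat PySem.Set.empty)

-- ===== PRECONDITION & SPEC =====
def Spec_get_i_in_j (wps : List (List Int)) (N : Int) (out : List (List Int)) : Prop := out = get_i_in_j_alt wps N
instance (wps : List (List Int)) (N : Int) (out : List (List Int)) : Decidable (Spec_get_i_in_j wps N out) := by unfold Spec_get_i_in_j; infer_instance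

-- ===== CLAIM (what is proved, stated in full; the proofs are below) =====
def Claim_equal_get_i_in_j : Prop := ∀ (wps : List (List Int)) (N : Int), Dom_get_i_in_j wps N → Spec_get_i_in_j wps N (get_i_in_j wps N)

-- ===== LEMMAS AND PROOFS =====

-- A's append-fold is a map
theorem foldl_append_singleton (f : Int → List Int) :
    ∀ (l : List Int) (acc : List (List Int)),
      l.foldl (fun a i => a ++ [f i]) acc = acc ++ l.map f := by
  intro l
  induction l with
  | nil => simp
  | cons x xs ih => intro acc; simp [List.foldl, ih]

-- canonical form of A's inner loop, over enumerate
def eSet (i : Int) (e : List (Int × List Int)) (s : List Int) : List Int :=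
  e.foldl (fun s p => if p.2.contains i then PySem.Set.add s p.1 else s) s

theorem aInner_eq (wps : List (List Int)) (i : Int) :
    aInner wps i = eSet i (PySem.List.enumerate wps 0) [] := by
  rw [aInner, eSet, PySem.List.enumerate_eq_map_pyRange wps ([] : List Int), List.foldl_map]
  simp [PySem.List.len]

theorem length_bRow (N j : Int) (bks : List (List Int)) (v : Int) :
    (bRow N j bks v).length = bks.length := by
  unfold bRow; split_ifs <;> simp

theorem length_foldl_bRow (N j : Int) :
    ∀ (lst : List Int) (bks : List (List Int)),
      (lst.foldl (bRow N j) bks).length = bks.length := by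
  intro lst
  induction lst with
  | nil => simp
  | cons v vs ih => intro bks; simp [List.foldl, ih, length_bRow]

theorem getD_foldl_bRow (N j : Int) :
    ∀ (lst : List Int) (bks : List (List Int)) (k : Nat),
      bks.length = N.toNat → k < N.toNat →
      (lst.foldl (bRow N j) bks).getD k [] =
        if lst.contains (k : Int) then PySem.Set.add (bks.getD k []) j else bks.getD k [] := by
  intro lst
  induction lst with
  | nil => simp
  | cons v vs ih =>
    intro bks k hlen hk
    have hlen' : (bRow N j bks v).length = N.toNat := by rw [length_bRow]; exact hlen
    rw [List.foldl_cons, ih _ k hlen' hk]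
    by_cases hv : v = (k : Int)
    · subst hv
      have hcond : 0 ≤ (k : Int) ∧ (k : Int) < N := by omega
      have hkn : ((k : Int)).toNat = k := by omega
      have hset : (bRow N j bks (k : Int)).getD k [] = PySem.Set.add (bks.getD k []) j := by
        simp [bRow, hcond, hkn, List.getD_eq_getElem?_getD, hlen, hk,
          PySem.Set.empty]
      rw [hset]
      simp
    · have hsame : (bRow N j bks v).getD k [] = bks.getD k [] := by
        unfold bRow
        split_ifs with h
        · have hne : v.toNat ≠ k := by omega
          simp [List.getD_eq_getElem?_getD, hne]
        · rfl
      rw [hsame]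
      have hc : (v :: vs).contains (k : Int) = vs.contains (k : Int) := by
        simp only [List.contains_cons]
        have hb : ((k : Int) == v) = false := by
          simp
          intro h; exact hv h.symm
        simp [hb]
      rw [hc]

theorem main_inv (N : Int) :
    ∀ (e : List (Int × List Int)) (bks : List (List Int)) (k : Nat),
      bks.length = N.toNat → k < N.toNat →
      (e.foldl (fun b p => p.2.foldl (bRow N p.1) b) bks).getD k [] =
        eSet (k : Int) e (bks.getD k []) := by
  intro e
  induction e with
  | nil => intro bks k _ _; rfl
  | cons p ps ih =>
    intro bks k hlen hk
    have hlen' : (p.2.foldl (bRow N p.1) bks).length = N.toNat := by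
      rw [length_foldl_bRow]; exact hlen
    rw [List.foldl_cons, ih _ k hlen' hk, getD_foldl_bRow N p.1 p.2 bks k hlen hk]
    simp only [eSet, List.foldl_cons]

theorem foldl_rows_length (N : Int) :
    ∀ (e : List (Int × List Int)) (bks : List (List Int)),
      (e.foldl (fun b p => p.2.foldl (bRow N p.1) b) bks).length = bks.length := by
  intro e
  induction e with
  | nil => intro bks; rfl
  | cons p ps ih => intro bks; rw [List.foldl_cons, ih, length_foldl_bRow]

theorem length_alt (wps : List (List Int)) (N : Int) :
    (get_i_in_j_alt wps N).length = N.toNat := by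
  rw [get_i_in_j_alt, foldl_rows_length, List.length_replicate]

-- ===== VERDICT (by name: the statement is the Claim_ definition above) =====
theorem get_i_in_j_spec : Claim_equal_get_i_in_j := by
  intro wps N _
  show get_i_in_j wps N = get_i_in_j_alt wps N
  have hA : get_i_in_j wps N = (PySem.List.pyRange 0 N 1).map (aInner wps) := by
    rw [get_i_in_j, foldl_append_singleton]
    rfl
  rw [hA]
  apply List.ext_getElem
  · rw [List.length_map, PySem.List.length_pyRange_one, length_alt]
    omega
  · intro k h1 h2
    have hk : k < N.toNat := by rw [length_alt] at h2; exact h2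
    rw [List.getElem_map, PySem.List.getElem_pyRange_one, aInner_eq]
    have halt : (get_i_in_j_alt wps N)[k] = (get_i_in_j_alt wps N).getD k [] :=
      (List.getD_eq_getElem _ _ h2).symm
    rw [halt, get_i_in_j_alt, main_inv N _ _ k (by simp) hk]
    simp [PySem.Set.empty]
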